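-- pv_equiv track=rewrite | github.com/jeffpace1974/ShoulderSerf | simple_captions_search.py | _detect_natural_phrases
-- ===== SOURCE A (Python) =====
-- from typing import List, Dict, Tuple, Optional, Set
--
-- def _detect_natural_phrases(query: str) -> List[str]:
--     """Detect natural 2-3 word phrases using linguistic patterns"""
--     import re
--
--     words = query.lower().split()
--     if len(words) < 2:
--         return []
--
--     phrases = []
--
--     # Pattern 1: Adjective + Noun ("particular state", "mental condition")
--     adjectives = {'particular', 'mental', 'physical', 'emotional', 'spiritual', 'proper', 'right', 'good', 'bad', 'special', 'certain'}
--     nouns = {'state', 'condition', 'mood', 'frame', 'mind', 'approach', 'method', 'way', 'technique', 'position', 'role'}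
--
--     for i in range(len(words) - 1):
--         if words[i] in adjectives and words[i + 1] in nouns:
--             phrases.append(f"{words[i]} {words[i + 1]}")
--
--     # Pattern 2: Verb + Pronoun ("puts himself", "describes himself")
--     verbs = {'puts', 'put', 'describes', 'finds', 'makes', 'gets', 'takes', 'gives'}
--     pronouns = {'himself', 'herself', 'myself', 'themselves'}
--
--     for i in range(len(words) - 1):
--         if words[i] in verbs and words[i + 1] in pronouns:
--             phrases.append(f"{words[i]} {words[i + 1]}")
--
--     # Pattern 3: Name + Name ("arthur greeves", "robot lady")
--     proper_nouns = {'lewis', 'arthur', 'greeves', 'robot', 'lady', 'jeff', 'jack', 'warren'}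
--
--     for i in range(len(words) - 1):
--         if words[i] in proper_nouns and words[i + 1] in proper_nouns:
--             phrases.append(f"{words[i]} {words[i + 1]}")
--
--     # Pattern 4: Title + Noun ("junior dean", "senior fellow")
--     titles = {'junior', 'senior', 'head', 'chief', 'master', 'professor'}
--     positions = {'dean', 'fellow', 'master', 'tutor', 'president', 'director'}
--
--     for i in range(len(words) - 1):
--         if words[i] in titles and words[i + 1] in positions:
--             phrases.append(f"{words[i]} {words[i + 1]}")
--
--     # Pattern 5: Common two-word concepts that appear together
--     common_pairs = [
--         # Look for consecutive words that commonly appear together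
--         ('reading', 'mood'), ('mental', 'state'), ('frame', 'mind'),
--         ('late', 'night'), ('fire', 'reading'), ('oxford', 'cambridge')
--     ]
--
--     for i in range(len(words) - 1):
--         pair = (words[i], words[i + 1])
--         if pair in common_pairs or (words[i + 1], words[i]) in common_pairs:
--             phrases.append(f"{words[i]} {words[i + 1]}")
--
--     return phrases
-- ===== SOURCE B (Python) =====
-- def _detect_natural_phrases(query: str) -> list:
--     """Single pass over adjacent word pairs, collecting matches into one
--     bucket per pattern; the concatenation of the buckets reproduces the
--     original pass-by-pass output order."""
--     adjectives = {'particular', 'mental', 'physical', 'emotional', 'spiritual', 'proper', 'right', 'good', 'bad', 'special', 'certain'}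
--     nouns = {'state', 'condition', 'mood', 'frame', 'mind', 'approach', 'method', 'way', 'technique', 'position', 'role'}
--     verbs = {'puts', 'put', 'describes', 'finds', 'makes', 'gets', 'takes', 'gives'}
--     pronouns = {'himself', 'herself', 'myself', 'themselves'}
--     proper_nouns = {'lewis', 'arthur', 'greeves', 'robot', 'lady', 'jeff', 'jack', 'warren'}
--     titles = {'junior', 'senior', 'head', 'chief', 'master', 'professor'}
--     positions = {'dean', 'fellow', 'master', 'tutor', 'president', 'director'}
--     common_pairs = {
--         ('reading', 'mood'), ('mental', 'state'), ('frame', 'mind'),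
--         ('late', 'night'), ('fire', 'reading'), ('oxford', 'cambridge')
--     }
--
--     words = query.lower().split()
--     b1, b2, b3, b4, b5 = [], [], [], [], []
--     for w1, w2 in zip(words, words[1:]):
--         phrase = f"{w1} {w2}"
--         if w1 in adjectives and w2 in nouns:
--             b1.append(phrase)
--         if w1 in verbs and w2 in pronouns:
--             b2.append(phrase)
--         if w1 in proper_nouns and w2 in proper_nouns:
--             b3.append(phrase)
--         if w1 in titles and w2 in positions:
--             b4.append(phrase)
--         if (w1, w2) in common_pairs or (w2, w1) in common_pairs:
--             b5.append(phrase)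
--     return b1 + b2 + b3 + b4 + b5
-- ===== Notes on version B (the rewrite author's own statement) =====
-- stated objective: alternative
-- what changed: Replaces A's five separate index loops over the word list (one per pattern) by a single pass over zipped adjacent word pairs that fills five per-pattern buckets and concatenates them at the end.
import Mathlib
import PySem

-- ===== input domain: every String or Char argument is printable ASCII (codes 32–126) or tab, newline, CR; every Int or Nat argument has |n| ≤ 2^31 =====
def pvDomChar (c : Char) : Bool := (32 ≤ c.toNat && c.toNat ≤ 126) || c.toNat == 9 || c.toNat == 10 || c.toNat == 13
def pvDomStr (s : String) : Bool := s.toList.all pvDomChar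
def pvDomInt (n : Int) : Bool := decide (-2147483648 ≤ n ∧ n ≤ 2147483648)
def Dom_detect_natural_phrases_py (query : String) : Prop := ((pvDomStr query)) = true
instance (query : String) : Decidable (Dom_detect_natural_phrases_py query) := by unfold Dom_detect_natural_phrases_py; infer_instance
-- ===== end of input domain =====

-- B replaces A's five separate index loops (one per pattern) by a single pass over
-- zipped adjacent word pairs filling five per-pattern buckets, concatenated at the end
-- (objective: alternative decomposition, same cost).

-- ===== PORT A =====
-- the set literals of A, as their lists of distinct elements
def pvAdjectives : List String := ["particular", "mental", "physical", "emotional", "spiritual", "proper", "right", "good", "bad", "special", "certain"]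
def pvNouns : List String := ["state", "condition", "mood", "frame", "mind", "approach", "method", "way", "technique", "position", "role"]
def pvVerbs : List String := ["puts", "put", "describes", "finds", "makes", "gets", "takes", "gives"]
def pvPronouns : List String := ["himself", "herself", "myself", "themselves"]
def pvProperNouns : List String := ["lewis", "arthur", "greeves", "robot", "lady", "jeff", "jack", "warren"]
def pvTitles : List String := ["junior", "senior", "head", "chief", "master", "professor"]
def pvPositions : List String := ["dean", "fellow", "master", "tutor", "president", "director"]
def pvCommonPairs : List (String × String) := [("reading", "mood"), ("mental", "state"), ("frame", "mind"), ("late", "night"), ("fire", "reading"), ("oxford", "cambridge")]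

-- literal port of A: words = query.lower().split(); early []; five passes 'for i in range(len(words)-1)'
-- appending f"{words[i]} {words[i+1]}" to one phrases list (words[i] via pyGetD: indices are in range)
def detect_natural_phrases_py (query : String) : List String :=
  let words := PySem.Str.split₀ (PySem.Str.lower query)
  if PySem.List.len words < 2 then []
  else
    let phrases : List String := []
    -- Pattern 1: Adjective + Noun
    let phrases := (PySem.List.pyRange 0 (PySem.List.len words - 1)).foldl
      (fun acc i =>
        if pvAdjectives.contains (PySem.List.pyGetD words i "") && pvNouns.contains (PySem.List.pyGetD words (i+1) "") then
          acc ++ [PySem.List.pyGetD words i "" ++ " " ++ PySem.List.pyGetD words (i+1) ""]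
        else acc) phrases
    -- Pattern 2: Verb + Pronoun
    let phrases := (PySem.List.pyRange 0 (PySem.List.len words - 1)).foldl
      (fun acc i =>
        if pvVerbs.contains (PySem.List.pyGetD words i "") && pvPronouns.contains (PySem.List.pyGetD words (i+1) "") then
          acc ++ [PySem.List.pyGetD words i "" ++ " " ++ PySem.List.pyGetD words (i+1) ""]
        else acc) phrases
    -- Pattern 3: Name + Name
    let phrases := (PySem.List.pyRange 0 (PySem.List.len words - 1)).foldl
      (fun acc i =>
        if pvProperNouns.contains (PySem.List.pyGetD words i "") && pvProperNouns.contains (PySem.List.pyGetD words (i+1) "") then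
          acc ++ [PySem.List.pyGetD words i "" ++ " " ++ PySem.List.pyGetD words (i+1) ""]
        else acc) phrases
    -- Pattern 4: Title + Noun
    let phrases := (PySem.List.pyRange 0 (PySem.List.len words - 1)).foldl
      (fun acc i =>
        if pvTitles.contains (PySem.List.pyGetD words i "") && pvPositions.contains (PySem.List.pyGetD words (i+1) "") then
          acc ++ [PySem.List.pyGetD words i "" ++ " " ++ PySem.List.pyGetD words (i+1) ""]
        else acc) phrases
    -- Pattern 5: common pairs, either order
    let phrases := (PySem.List.pyRange 0 (PySem.List.len words - 1)).foldl
      (fun acc i =>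
        let pair := (PySem.List.pyGetD words i "", PySem.List.pyGetD words (i+1) "")
        if pvCommonPairs.contains pair || pvCommonPairs.contains (PySem.List.pyGetD words (i+1) "", PySem.List.pyGetD words i "") then
          acc ++ [PySem.List.pyGetD words i "" ++ " " ++ PySem.List.pyGetD words (i+1) ""]
        else acc) phrases
    phrases

-- ===== PORT B =====
-- helpers naming Source B's five membership tests and the f-string
def pvPhraseOf (p : String × String) : String := p.1 ++ " " ++ p.2
def pvC1 (p : String × String) : Bool := pvAdjectives.contains p.1 && pvNouns.contains p.2
def pvC2 (p : String × String) : Bool := pvVerbs.contains p.1 && pvPronouns.contains p.2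
def pvC3 (p : String × String) : Bool := pvProperNouns.contains p.1 && pvProperNouns.contains p.2
def pvC4 (p : String × String) : Bool := pvTitles.contains p.1 && pvPositions.contains p.2
def pvC5 (p : String × String) : Bool := pvCommonPairs.contains p || pvCommonPairs.contains (p.2, p.1)

-- literal port of B: one fold over zip(words, words[1:]) carrying the five buckets, then b1+b2+b3+b4+b5
def detect_natural_phrases_py_alt (query : String) : List String :=
  let words := PySem.Str.split₀ (PySem.Str.lower query)
  let pairs := words.zip (PySem.List.slice words (some 1))   -- zip(words, words[1:])
  let b := pairs.foldl
    (fun (b : List String × List String × List String × List String × List String) p =>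
      (if pvC1 p then b.1 ++ [pvPhraseOf p] else b.1,
       if pvC2 p then b.2.1 ++ [pvPhraseOf p] else b.2.1,
       if pvC3 p then b.2.2.1 ++ [pvPhraseOf p] else b.2.2.1,
       if pvC4 p then b.2.2.2.1 ++ [pvPhraseOf p] else b.2.2.2.1,
       if pvC5 p then b.2.2.2.2 ++ [pvPhraseOf p] else b.2.2.2.2))
    ([], [], [], [], [])
  b.1 ++ b.2.1 ++ b.2.2.1 ++ b.2.2.2.1 ++ b.2.2.2.2

-- ===== PRECONDITION & SPEC =====
def Spec_detect_natural_phrases_py (query : String) (out : List String) : Prop := out = detect_natural_phrases_py_alt query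
instance (query : String) (out : List String) : Decidable (Spec_detect_natural_phrases_py query out) := by unfold Spec_detect_natural_phrases_py; infer_instance

-- ===== CLAIM (what is proved, stated in full; the proofs are below) =====
def Claim_equal_detect_natural_phrases_py : Prop := ∀ (query : String), Dom_detect_natural_phrases_py query → Spec_detect_natural_phrases_py query (detect_natural_phrases_py query)

-- ===== LEMMAS AND PROOFS =====

-- one of A's index passes, over any start accumulator, is a filter/map over adjacent pairs
lemma pvPassA (ws : List String) (c : String → String → Bool) (init : List String) :
    (PySem.List.pyRange 0 (PySem.List.len ws - 1)).foldl
      (fun acc i =>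
        if c (PySem.List.pyGetD ws i "") (PySem.List.pyGetD ws (i+1) "") then
          acc ++ [PySem.List.pyGetD ws i "" ++ " " ++ PySem.List.pyGetD ws (i+1) ""]
        else acc) init
    = init ++ (((ws.zip (ws.drop 1)).filter (fun p => c p.1 p.2)).map pvPhraseOf) := by
  cases ws with
  | nil =>
      rw [PySem.List.pyRange_one_eq_nil (by simp [PySem.List.len])]
      simp
  | cons w rest =>
      have hp : PySem.List.len (w :: rest) - 1 = (((w :: rest).zip ((w :: rest).drop 1)).length : Int) := by
        simp [PySem.List.len, List.length_zip]
      rw [hp]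
      rw [PySem.List.foldl_congr_mem _ _
        (fun acc j =>
          if c (PySem.List.pyGetD ((w :: rest).zip ((w :: rest).drop 1)) j ("", "")).1
               (PySem.List.pyGetD ((w :: rest).zip ((w :: rest).drop 1)) j ("", "")).2 then
            acc ++ [(PySem.List.pyGetD ((w :: rest).zip ((w :: rest).drop 1)) j ("", "")).1 ++ " " ++
                    (PySem.List.pyGetD ((w :: rest).zip ((w :: rest).drop 1)) j ("", "")).2]
          else acc) _ ?_]
      · rw [PySem.List.foldl_pyRange_zero_pyGetD' ((w :: rest).zip ((w :: rest).drop 1)) ("", "")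
          (fun acc p => if c p.1 p.2 then acc ++ [p.1 ++ " " ++ p.2] else acc) init]
        rw [PySem.List.foldl_append_if (fun p : String × String => c p.1 p.2) (fun p : String × String => p.1 ++ " " ++ p.2)]
        rfl
      · intro acc j hj
        rw [PySem.List.mem_pyRange_one] at hj
        have hlen : ((w :: rest).zip ((w :: rest).drop 1)).length = rest.length := by
          simp [List.length_zip]
        have hjlt : j.toNat < rest.length := by omega
        have h1 : PySem.List.pyGetD ((w :: rest).zip ((w :: rest).drop 1)) j ("", "")
            = ((w :: rest)[j.toNat]'(by simp; omega), (w :: rest)[j.toNat + 1]'(by simp; omega)) := by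
          rw [PySem.List.pyGetD_eq_getElem _ _ hj.1 (by rw [hlen] at hj ⊢; exact_mod_cast hj.2)]
          simp [List.getElem_zip]
        have h2 : PySem.List.pyGetD (w :: rest) j "" = (w :: rest)[j.toNat]'(by simp; omega) := by
          exact PySem.List.pyGetD_eq_getElem _ _ hj.1 (by simp; omega)
        have h3 : PySem.List.pyGetD (w :: rest) (j + 1) "" = (w :: rest)[j.toNat + 1]'(by simp; omega) := by
          rw [PySem.List.pyGetD_eq_getElem _ _ (by omega) (by simp; omega)]
          congr 1
          omega
        simp only [h1, h2, h3]

-- the five-bucket fold computes the five filter/maps at once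
lemma pvFold5 (l : List (String × String)) (b1 b2 b3 b4 b5 : List String) :
    l.foldl
      (fun (b : List String × List String × List String × List String × List String) p =>
        (if pvC1 p then b.1 ++ [pvPhraseOf p] else b.1,
         if pvC2 p then b.2.1 ++ [pvPhraseOf p] else b.2.1,
         if pvC3 p then b.2.2.1 ++ [pvPhraseOf p] else b.2.2.1,
         if pvC4 p then b.2.2.2.1 ++ [pvPhraseOf p] else b.2.2.2.1,
         if pvC5 p then b.2.2.2.2 ++ [pvPhraseOf p] else b.2.2.2.2))
      (b1, b2, b3, b4, b5)
    = (b1 ++ (l.filter pvC1).map pvPhraseOf,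
       b2 ++ (l.filter pvC2).map pvPhraseOf,
       b3 ++ (l.filter pvC3).map pvPhraseOf,
       b4 ++ (l.filter pvC4).map pvPhraseOf,
       b5 ++ (l.filter pvC5).map pvPhraseOf) := by
  induction l generalizing b1 b2 b3 b4 b5 with
  | nil => simp
  | cons p t ih =>
      simp only [List.foldl_cons, List.filter_cons]
      rw [ih]
      split_ifs <;> simp

-- ===== VERDICT (by name: the statement is the Claim_ definition above) =====
theorem detect_natural_phrases_py_spec : Claim_equal_detect_natural_phrases_py := by
  intro query _
  unfold Spec_detect_natural_phrases_py detect_natural_phrases_py detect_natural_phrases_py_alt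
  simp only []
  set ws := PySem.Str.split₀ (PySem.Str.lower query) with hws
  have hslice : PySem.List.slice ws (some 1) = ws.drop 1 := by
    exact_mod_cast PySem.List.slice_from_natCast ws 1
  rw [hslice, pvFold5]
  by_cases h : PySem.List.len ws < 2
  · rw [if_pos h]
    have : ws.zip (ws.drop 1) = [] := by
      match ws with
      | [] => rfl
      | [a] => rfl
      | a :: b :: t =>
          simp [PySem.List.len] at h
          omega
    rw [this]
    simp
  · rw [if_neg h]
    rw [pvPassA ws (fun a b => pvAdjectives.contains a && pvNouns.contains b),
        pvPassA ws (fun a b => pvVerbs.contains a && pvPronouns.contains b),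
        pvPassA ws (fun a b => pvProperNouns.contains a && pvProperNouns.contains b),
        pvPassA ws (fun a b => pvTitles.contains a && pvPositions.contains b),
        pvPassA ws (fun a b => pvCommonPairs.contains (a, b) || pvCommonPairs.contains (b, a))]
    simp only [List.nil_append, List.append_assoc]
    congr 1
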